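-- pv_equiv track=rewrite | github.com/wagner-austin/handwriting-ai | scripts/guards/exceptions_rules.py | _enclosing_function_name
-- ===== SOURCE A (Python) =====
-- def _enclosing_function_name(lines: list[str], idx: int, indent: int) -> str | None:
--     j = idx - 1
--     while j >= 0:
--         raw = lines[j]
--         if not raw.strip():
--             j -= 1
--             continue
--         raw_indent = len(raw) - len(raw.lstrip(" \t"))
--         if raw.lstrip().startswith("def ") and raw_indent <= indent:
--             sig = raw.strip()
--             return sig[4 : sig.find("(")].strip() if "(" in sig else sig[4:].strip()
--         j -= 1
--     return None
-- ===== SOURCE B (Python) =====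
-- def _enclosing_function_name(lines: list[str], idx: int, indent: int) -> str | None:
--     # Forward scan: remember the most recent matching 'def ' line among lines[0:idx].
--     name = None
--     for i, raw in enumerate(lines):
--         if i >= idx:
--             break
--         if not raw.strip():
--             continue
--         if raw.lstrip().startswith("def ") and len(raw) - len(raw.lstrip(" \t")) <= indent:
--             sig = raw.strip()
--             name = sig[4 : sig.find("(")].strip() if "(" in sig else sig[4:].strip()
--     return name
-- ===== Notes on version B (the rewrite author's own statement) =====
-- stated objective: alternative
-- what changed: Replaces A's backward while-loop with early return by a single forward pass over lines[0:idx] that keeps the name of the most recent matching 'def ' line in an accumulator.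
import Mathlib
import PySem

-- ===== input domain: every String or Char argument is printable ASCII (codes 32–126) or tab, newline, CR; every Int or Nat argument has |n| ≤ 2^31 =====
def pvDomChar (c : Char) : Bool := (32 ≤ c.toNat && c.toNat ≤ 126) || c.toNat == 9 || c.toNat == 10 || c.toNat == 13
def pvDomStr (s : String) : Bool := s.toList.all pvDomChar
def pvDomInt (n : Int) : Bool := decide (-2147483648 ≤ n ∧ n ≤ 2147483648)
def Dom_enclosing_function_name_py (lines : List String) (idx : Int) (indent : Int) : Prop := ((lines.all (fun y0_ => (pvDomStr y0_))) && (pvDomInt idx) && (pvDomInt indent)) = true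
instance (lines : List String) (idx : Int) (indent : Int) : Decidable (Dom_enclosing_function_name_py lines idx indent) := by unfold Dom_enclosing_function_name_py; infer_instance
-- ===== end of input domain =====

-- B scans forward over lines[0:idx] keeping the last matching 'def ' line, instead of A's
-- backward early-exit scan (objective: alternative decomposition, same cost class).


-- ===== PORT A =====
-- shared micro-helpers for Python expressions that occur verbatim in both sources:
-- raw.lstrip(" \t") ported by hand: drop leading ' '/'\t' (exact: lstrip with an explicit char set)
def pvLstripST (raw : String) : List Char := raw.toList.dropWhile (fun c => c == ' ' || c == '\t')
-- the test `raw.lstrip().startswith("def ") and len(raw)-len(raw.lstrip(" \t")) <= indent`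
def pvIsDef (raw : String) (indent : Int) : Bool :=
  PySem.Str.startswith (PySem.Str.lstrip raw) "def " &&
    decide (((PySem.Str.len raw : Int) - ((pvLstripST raw).length : Int)) ≤ indent)
-- `sig[4:sig.find("(")].strip() if "(" in sig else sig[4:].strip()`
def pvSigName (sig : String) : String :=
  if PySem.Str.isIn "(" sig then
    PySem.Str.strip (PySem.Str.slice sig (some 4) (some (PySem.Str.find sig "(")))
  else
    PySem.Str.strip (PySem.Str.slice sig (some 4) none)

-- one iteration of A's while loop at index j; `next` is the value of continuing with j-1
def pvAcheck (lines : List String) (indent : Int) (j : Nat) (next : Option String) : Option String :=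
  match PySem.List.pyGet? lines (j : Int) with
  | none => none  -- IndexError (outside Pre_)
  | some raw =>
    if PySem.Str.strip raw = "" then next
    else if pvIsDef raw indent then some (pvSigName (PySem.Str.strip raw))
    else next

def pvAgo (lines : List String) (indent : Int) : Nat → Option String
  | 0 => pvAcheck lines indent 0 none
  | j + 1 => pvAcheck lines indent (j + 1) (pvAgo lines indent j)

def enclosing_function_name_py (lines : List String) (idx : Int) (indent : Int) : Option String :=
  if 0 ≤ idx - 1 then pvAgo lines indent (idx - 1).toNat else none

-- ===== PORT B =====
-- `for i, raw in enumerate(lines): if i >= idx: break; …` carrying the running `name`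
def pvBgo (indent idx : Int) : Nat → List String → Option String → Option String
  | _, [], name => name
  | i, raw :: rest, name =>
    if (i : Int) ≥ idx then name
    else
      pvBgo indent idx (i + 1) rest
        (if PySem.Str.strip raw = "" then name
         else if pvIsDef raw indent then some (pvSigName (PySem.Str.strip raw))
         else name)

def enclosing_function_name_py_alt (lines : List String) (idx : Int) (indent : Int) : Option String :=
  pvBgo indent idx 0 lines none

-- ===== PRECONDITION & SPEC =====
-- A raises IndexError iff idx exceeds len(lines) (it reads lines[idx-1] first); Pre_ excludes exactly those inputs.
def Pre_enclosing_function_name_py (lines : List String) (idx : Int) (indent : Int) : Prop :=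
  idx ≤ (lines.length : Int)
instance (lines : List String) (idx : Int) (indent : Int) : Decidable (Pre_enclosing_function_name_py lines idx indent) := by unfold Pre_enclosing_function_name_py; infer_instance

def pvWitness_enclosing_function_name_py : List String × Int × Int := (["def f():"], 1, 0)

def Spec_enclosing_function_name_py (lines : List String) (idx : Int) (indent : Int) (out : Option String) : Prop := out = enclosing_function_name_py_alt lines idx indent
instance (lines : List String) (idx : Int) (indent : Int) (out : Option String) : Decidable (Spec_enclosing_function_name_py lines idx indent out) := by unfold Spec_enclosing_function_name_py; infer_instance

-- ===== CLAIM (what is proved, stated in full; the proofs are below) =====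
def Claim_equal_enclosing_function_name_py : Prop := ∀ (lines : List String) (idx : Int) (indent : Int), Dom_enclosing_function_name_py lines idx indent → Pre_enclosing_function_name_py lines idx indent → Spec_enclosing_function_name_py lines idx indent (enclosing_function_name_py lines idx indent)

-- ===== LEMMAS AND PROOFS =====

-- the body of both loops, as a fold step
def pvStep (indent : Int) (name : Option String) (raw : String) : Option String :=
  if PySem.Str.strip raw = "" then name
  else if pvIsDef raw indent then some (pvSigName (PySem.Str.strip raw))
  else name

-- A's backward scan, on the reversed processed prefix
def pvFind (indent : Int) : List String → Option String
  | [] => none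
  | raw :: rest =>
    if PySem.Str.strip raw = "" then pvFind indent rest
    else if pvIsDef raw indent then some (pvSigName (PySem.Str.strip raw))
    else pvFind indent rest

lemma pvAgo_eq_find (lines : List String) (indent : Int) :
    ∀ j : Nat, j < lines.length →
      pvAgo lines indent j = pvFind indent ((lines.take (j + 1)).reverse) := by
  intro j
  induction j with
  | zero =>
    intro hj
    simp only [pvAgo, pvAcheck, PySem.List.pyGet?_natCast, List.getElem?_eq_getElem hj,
      List.take_succ, List.take_zero, List.nil_append, List.getElem?_eq_getElem hj]
    simp [pvFind]
  | succ k ih =>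
    intro hj
    have hk : k < lines.length := Nat.lt_of_succ_lt hj
    simp only [pvAgo, pvAcheck, PySem.List.pyGet?_natCast, List.getElem?_eq_getElem hj]
    rw [List.take_succ, List.getElem?_eq_getElem hj]
    simp only [Option.toList_some, List.reverse_append, List.reverse_cons, List.reverse_nil,
      List.nil_append, List.singleton_append]
    rw [ih hk]
    simp [pvFind]

lemma pvBgo_eq_foldl (indent idx : Int) :
    ∀ (xs : List String) (i : Nat) (name : Option String),
      pvBgo indent idx i xs name = ((xs.take (idx - i).toNat).foldl (pvStep indent) name) := by
  intro xs
  induction xs with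
  | nil => intro i name; simp [pvBgo]
  | cons raw rest ih =>
    intro i name
    by_cases h : (i : Int) ≥ idx
    · have : (idx - (i : Int)).toNat = 0 := by omega
      simp [pvBgo, h, this]
    · have h1 : (idx - (i : Int)).toNat = (idx - ((i : Nat) + 1 : Nat)).toNat + 1 := by
        push_cast; omega
      simp only [pvBgo, if_neg h, ih]
      rw [h1]
      simp [List.take_succ_cons, List.foldl_cons, pvStep]

lemma pvFind_cons (indent : Int) (raw : String) (rest : List String) :
    pvFind indent (raw :: rest) =
      (if PySem.Str.strip raw = "" then pvFind indent rest
       else if pvIsDef raw indent then some (pvSigName (PySem.Str.strip raw))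
       else pvFind indent rest) := rfl

lemma pvFoldl_eq_find (indent : Int) :
    ∀ (xs : List String) (name : Option String),
      xs.foldl (pvStep indent) name =
        (match pvFind indent xs.reverse with
         | some r => some r
         | none => name) := by
  intro xs
  induction xs using List.reverseRecOn with
  | nil => intro name; simp [pvFind]
  | append_singleton ys raw ih =>
    intro name
    rw [List.foldl_append, List.foldl_cons, List.foldl_nil, List.reverse_append]
    simp only [List.reverse_cons, List.reverse_nil, List.nil_append, List.singleton_append]
    rw [ih, pvFind_cons]
    unfold pvStep
    split_ifs with hb hd <;> (cases pvFind indent ys.reverse <;> simp)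

-- ===== VERDICT (by name: the statement is the Claim_ definition above) =====
theorem enclosing_function_name_py_spec : Claim_equal_enclosing_function_name_py := by
  intro lines idx indent _ hpre
  unfold Spec_enclosing_function_name_py enclosing_function_name_py enclosing_function_name_py_alt
  rw [pvBgo_eq_foldl, pvFoldl_eq_find]
  by_cases h : 0 ≤ idx - 1
  · have hlt : (idx - 1).toNat < lines.length := by
      unfold Pre_enclosing_function_name_py at hpre; omega
    have htake : (idx - (0 : Nat)).toNat = (idx - 1).toNat + 1 := by omega
    rw [if_pos h, pvAgo_eq_find lines indent _ hlt, htake]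
    cases pvFind indent ((lines.take ((idx - 1).toNat + 1)).reverse) <;> simp
  · have : (idx - (0 : Nat)).toNat = 0 := by omega
    rw [if_neg h, this]
    simp [pvFind]
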